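-- pv_equiv track=rewrite | github.com/davidmohara/Jarvis | skills/plaud-transcript/scripts/plaud_workflow.py | parse_action_items
-- ===== SOURCE A (Python) =====
-- def parse_action_items(ai_content):
--     """Extract action items and key decisions from sum_multi_note."""
--     if not ai_content:
--         return "", "", ""
--
--     sections = {"action_items": "", "key_decisions": "", "detailed_minutes": ""}
--     current_section = None
--     current_lines = []
--
--     for line in ai_content.split("\n"):
--         stripped = line.strip()
--         if stripped.startswith("## Action Items") or stripped.startswith("### Action Items"):
--             if current_section:
--                 sections[current_section] = "\n".join(current_lines).strip()
--             current_section = "action_items"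
--             current_lines = []
--         elif stripped.startswith("## Key Decisions") or stripped.startswith("### Key Decisions"):
--             if current_section:
--                 sections[current_section] = "\n".join(current_lines).strip()
--             current_section = "key_decisions"
--             current_lines = []
--         elif stripped.startswith("## Detailed Minutes") or stripped.startswith("### Detailed Minutes"):
--             if current_section:
--                 sections[current_section] = "\n".join(current_lines).strip()
--             current_section = "detailed_minutes"
--             current_lines = []
--         elif current_section:
--             current_lines.append(line)
--
--     if current_section:
--         sections[current_section] = "\n".join(current_lines).strip()
--
--     return sections["action_items"], sections["key_decisions"], sections["detailed_minutes"]
-- ===== SOURCE B (Python) =====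
-- _HEADERS = (
--     ("## Action Items", "action_items"),
--     ("### Action Items", "action_items"),
--     ("## Key Decisions", "key_decisions"),
--     ("### Key Decisions", "key_decisions"),
--     ("## Detailed Minutes", "detailed_minutes"),
--     ("### Detailed Minutes", "detailed_minutes"),
-- )
--
--
-- def _header_key(line):
--     """Section name this line opens, or None if it is not a recognized header."""
--     stripped = line.strip()
--     for prefix, key in _HEADERS:
--         if stripped.startswith(prefix):
--             return key
--     return None
--
--
-- def _split_at_header(lines):
--     """Split lines into (the prefix before the first header line, the rest)."""
--     for n, line in enumerate(lines):
--         if _header_key(line) is not None: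
--             return lines[:n], lines[n:]
--     return lines, []
--
--
-- def parse_action_items(ai_content):
--     """Extract action items and key decisions from sum_multi_note."""
--     if not ai_content:
--         return "", "", ""
--
--     sections = {}
--     _, rest = _split_at_header(ai_content.split("\n"))
--     while rest:
--         key = _header_key(rest[0])  # rest[0] is a header line by construction
--         block, rest = _split_at_header(rest[1:])
--         sections[key] = "\n".join(block).strip()
--
--     return (
--         sections.get("action_items", ""),
--         sections.get("key_decisions", ""),
--         sections.get("detailed_minutes", ""),
--     )
-- ===== Notes on version B (the rewrite author's own statement) =====
-- stated objective: alternative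
-- what changed: Replaces A's single-pass state machine (current-section flag, line accumulator, flush-on-header dict writes) with a split-at-next-header decomposition: drop the preamble before the first header, then repeatedly cut off the block up to the next header and assign it to that header's key; last-wins and empty blocks fall out of plain dict assignment.
import Mathlib
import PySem

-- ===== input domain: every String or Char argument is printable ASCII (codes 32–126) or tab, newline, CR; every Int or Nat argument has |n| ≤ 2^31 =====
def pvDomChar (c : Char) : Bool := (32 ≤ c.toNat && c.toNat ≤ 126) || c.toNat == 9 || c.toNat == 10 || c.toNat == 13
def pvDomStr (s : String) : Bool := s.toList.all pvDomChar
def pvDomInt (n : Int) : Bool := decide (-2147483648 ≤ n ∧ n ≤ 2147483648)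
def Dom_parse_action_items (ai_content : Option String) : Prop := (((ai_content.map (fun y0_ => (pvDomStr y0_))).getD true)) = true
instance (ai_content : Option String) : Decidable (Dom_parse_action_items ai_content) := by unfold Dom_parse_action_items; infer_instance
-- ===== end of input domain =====

-- B replaces A's line-by-line state machine with a recursive split-at-next-header
-- decomposition (objective: alternative, same O(n) cost); return value only, no mutation.

-- ===== PORT A =====
-- state = (sections dict, current_section, current_lines)
def aStep (st : PySem.Dict String String × Option String × List String) (line : String) :
    PySem.Dict String String × Option String × List String :=
  let stripped := PySem.Str.strip line
  if PySem.Str.startswith stripped "## Action Items" || PySem.Str.startswith stripped "### Action Items" then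
    (match st.2.1 with
     | some cur => st.1.insert cur (PySem.Str.strip (PySem.Str.join "\n" st.2.2))
     | none => st.1, some "action_items", [])
  else if PySem.Str.startswith stripped "## Key Decisions" || PySem.Str.startswith stripped "### Key Decisions" then
    (match st.2.1 with
     | some cur => st.1.insert cur (PySem.Str.strip (PySem.Str.join "\n" st.2.2))
     | none => st.1, some "key_decisions", [])
  else if PySem.Str.startswith stripped "## Detailed Minutes" || PySem.Str.startswith stripped "### Detailed Minutes" then
    (match st.2.1 with
     | some cur => st.1.insert cur (PySem.Str.strip (PySem.Str.join "\n" st.2.2))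
     | none => st.1, some "detailed_minutes", [])
  else
    match st.2.1 with
    | some _ => (st.1, st.2.1, st.2.2 ++ [line])
    | none => st

def parse_action_items (ai_content : Option String) : String × String × String :=
  match ai_content with
  | none => ("", "", "")
  | some s =>
    if s = "" then ("", "", "")
    else
      let init : PySem.Dict String String :=
        ((PySem.Dict.empty.insert "action_items" "").insert "key_decisions" "").insert "detailed_minutes" ""
      let st := ((PySem.Str.split? s "\n").getD []).foldl aStep (init, (none : Option String), ([] : List String))
      let d := match st.2.1 with
        | some cur => st.1.insert cur (PySem.Str.strip (PySem.Str.join "\n" st.2.2))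
        | none => st.1
      -- keys always present, so getD "" is exact for Python's sections[...]
      (d.getD "action_items" "", d.getD "key_decisions" "", d.getD "detailed_minutes" "")

-- ===== PORT B =====
def bHeaders : List (String × String) :=
  [("## Action Items", "action_items"), ("### Action Items", "action_items"),
   ("## Key Decisions", "key_decisions"), ("### Key Decisions", "key_decisions"),
   ("## Detailed Minutes", "detailed_minutes"), ("### Detailed Minutes", "detailed_minutes")]

def headerKey (line : String) : Option String :=
  let stripped := PySem.Str.strip line
  (bHeaders.find? (fun p => PySem.Str.startswith stripped p.1)).map (·.2)

def splitAtHeader : List String → List String × List String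
  | [] => ([], [])
  | l :: t =>
    if (headerKey l).isSome then ([], l :: t)
    else
      let pr := splitAtHeader t
      (l :: pr.1, pr.2)

-- termination measure for bLoop
theorem splitAtHeader_snd_le (l : List String) : (splitAtHeader l).2.length ≤ l.length := by
  induction l with
  | nil => simp [splitAtHeader]
  | cons h t ih =>
    simp only [splitAtHeader]
    split
    · simp
    · simpa using Nat.le_succ_of_le ih

-- B's dict is keyed by Option String, matching Python where _header_key may (in principle) return None
def bLoop (sections : PySem.Dict (Option String) String) (rest : List String) :
    PySem.Dict (Option String) String :=
  match rest with
  | [] => sections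
  | h :: t =>
    let key := headerKey h
    let pr := splitAtHeader t
    bLoop (sections.insert key (PySem.Str.strip (PySem.Str.join "\n" pr.1))) pr.2
termination_by rest.length
decreasing_by
  exact Nat.lt_succ_of_le (splitAtHeader_snd_le t)

def parse_action_items_alt (ai_content : Option String) : String × String × String :=
  match ai_content with
  | none => ("", "", "")
  | some s =>
    if s = "" then ("", "", "")
    else
      let rest := (splitAtHeader ((PySem.Str.split? s "\n").getD [])).2
      let d := bLoop PySem.Dict.empty rest
      (d.getD (some "action_items") "", d.getD (some "key_decisions") "", d.getD (some "detailed_minutes") "")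

-- ===== PRECONDITION & SPEC =====
def Spec_parse_action_items (ai_content : Option String) (out : String × String × String) : Prop := out = parse_action_items_alt ai_content
instance (ai_content : Option String) (out : String × String × String) : Decidable (Spec_parse_action_items ai_content out) := by unfold Spec_parse_action_items; infer_instance

-- ===== CLAIM (what is proved, stated in full; the proofs are below) =====
def Claim_equal_parse_action_items : Prop := ∀ (ai_content : Option String), Dom_parse_action_items ai_content → Spec_parse_action_items ai_content (parse_action_items ai_content)

-- ===== LEMMAS AND PROOFS =====

def readA (d : PySem.Dict String String) : String × String × String :=
  (d.getD "action_items" "", d.getD "key_decisions" "", d.getD "detailed_minutes" "")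

def readB (d : PySem.Dict (Option String) String) : String × String × String :=
  (d.getD (some "action_items") "", d.getD (some "key_decisions") "", d.getD (some "detailed_minutes") "")

def finalA (st : PySem.Dict String String × Option String × List String) : PySem.Dict String String :=
  match st.2.1 with
  | some cur => st.1.insert cur (PySem.Str.strip (PySem.Str.join "\n" st.2.2))
  | none => st.1

theorem finalA_some (d : PySem.Dict String String) (k : String) (acc : List String) :
    finalA (d, some k, acc) = d.insert k (PySem.Str.strip (PySem.Str.join "\n" acc)) := rfl

theorem bLoop_nil (d : PySem.Dict (Option String) String) : bLoop d [] = d := by rw [bLoop.eq_def]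

-- A's step, re-expressed through B's header classifier
theorem aStep_eq (st : PySem.Dict String String × Option String × List String) (line : String) :
    aStep st line =
      match headerKey line with
      | some k => (finalA st, some k, [])
      | none =>
        match st.2.1 with
        | some _ => (st.1, st.2.1, st.2.2 ++ [line])
        | none => st := by
  cases h1 : PySem.Str.startswith (PySem.Str.strip line) "## Action Items" <;>
  cases h2 : PySem.Str.startswith (PySem.Str.strip line) "### Action Items" <;>
  cases h3 : PySem.Str.startswith (PySem.Str.strip line) "## Key Decisions" <;>
  cases h4 : PySem.Str.startswith (PySem.Str.strip line) "### Key Decisions" <;>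
  cases h5 : PySem.Str.startswith (PySem.Str.strip line) "## Detailed Minutes" <;>
  cases h6 : PySem.Str.startswith (PySem.Str.strip line) "### Detailed Minutes" <;>
    simp only [aStep, headerKey, bHeaders, List.find?, finalA, Option.map,
      h1, h2, h3, h4, h5, h6, Bool.or_false, Bool.or_true, if_true, Bool.or_self] <;> simp

theorem splitAtHeader_cons_none {l : String} (t : List String) (h : headerKey l = none) :
    splitAtHeader (l :: t) = (l :: (splitAtHeader t).1, (splitAtHeader t).2) := by
  simp [splitAtHeader, h]

theorem splitAtHeader_cons_some {l : String} (t : List String) {k : String} (h : headerKey l = some k) :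
    splitAtHeader (l :: t) = ([], l :: t) := by
  simp [splitAtHeader, h]

theorem bLoop_cons (d : PySem.Dict (Option String) String) (h : String) (t : List String) :
    bLoop d (h :: t) =
      bLoop (d.insert (headerKey h) (PySem.Str.strip (PySem.Str.join "\n" (splitAtHeader t).1))) (splitAtHeader t).2 := by
  rw [bLoop.eq_def]

theorem read_insert (da : PySem.Dict String String) (db : PySem.Dict (Option String) String)
    (hR : ∀ n, da.getD n "" = db.getD (some n) "") (k v : String) (n : String) :
    (da.insert k v).getD n "" = (db.insert (some k) v).getD (some n) "" := by
  rw [PySem.Dict.getD_insert, PySem.Dict.getD_insert]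
  by_cases h : n = k <;> simp [h, hR n]

theorem read_eq (da : PySem.Dict String String) (db : PySem.Dict (Option String) String)
    (hR : ∀ n, da.getD n "" = db.getD (some n) "") : readA da = readB db := by
  unfold readA readB
  rw [hR, hR, hR]

theorem chunk_lemma (lines : List String) (da : PySem.Dict String String)
    (db : PySem.Dict (Option String) String) (k : String) (acc : List String)
    (hR : ∀ n, da.getD n "" = db.getD (some n) "") :
    readA (finalA (lines.foldl aStep (da, some k, acc)))
      = readB (bLoop (db.insert (some k)
          (PySem.Str.strip (PySem.Str.join "\n" (acc ++ (splitAtHeader lines).1))))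
          (splitAtHeader lines).2) := by
  induction lines generalizing da db k acc with
  | nil =>
    simp only [List.foldl_nil, splitAtHeader, List.append_nil, bLoop_nil, finalA_some]
    exact read_eq _ _ (fun n => read_insert da db hR k _ n)
  | cons h t ih =>
    cases hk : headerKey h with
    | none =>
      rw [splitAtHeader_cons_none t hk]
      simp only [List.foldl_cons, aStep_eq, hk]
      simpa using ih da db k (acc ++ [h]) hR
    | some k' =>
      rw [splitAtHeader_cons_some t hk]
      simp only [List.foldl_cons, aStep_eq, hk, finalA_some]
      rw [ih (da.insert k (PySem.Str.strip (PySem.Str.join "\n" acc)))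
            (db.insert (some k) (PySem.Str.strip (PySem.Str.join "\n" acc))) k' []
            (fun n => read_insert da db hR k _ n)]
      rw [bLoop_cons, hk]
      simp

theorem prephase_lemma (lines : List String) (da : PySem.Dict String String)
    (db : PySem.Dict (Option String) String)
    (hR : ∀ n, da.getD n "" = db.getD (some n) "") :
    readA (finalA (lines.foldl aStep (da, none, [])))
      = readB (bLoop db (splitAtHeader lines).2) := by
  induction lines generalizing da db with
  | nil =>
    simp only [List.foldl_nil, splitAtHeader, bLoop_nil]
    exact read_eq _ _ hR
  | cons h t ih =>
    cases hk : headerKey h with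
    | none =>
      rw [splitAtHeader_cons_none t hk]
      simp only [List.foldl_cons, aStep_eq, hk]
      exact ih da db hR
    | some k' =>
      rw [splitAtHeader_cons_some t hk]
      simp only [List.foldl_cons, aStep_eq, hk]
      rw [show finalA (da, (none : Option String), ([] : List String)) = da from rfl]
      rw [chunk_lemma t da db k' [] hR, bLoop_cons, hk]
      simp

theorem init_rel : ∀ n,
    ((((PySem.Dict.empty.insert "action_items" "").insert "key_decisions" "").insert "detailed_minutes" "" :
        PySem.Dict String String)).getD n ""
      = (PySem.Dict.empty : PySem.Dict (Option String) String).getD (some n) "" := by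
  intro n
  simp [PySem.Dict.getD_insert, PySem.Dict.getD_empty]

theorem portA_some (s : String) (hs : ¬ s = "") :
    parse_action_items (some s)
      = readA (finalA ((((PySem.Str.split? s "\n").getD []).foldl aStep
          (((PySem.Dict.empty.insert "action_items" "").insert "key_decisions" "").insert "detailed_minutes" "",
            (none : Option String), ([] : List String)))) ) := by
  simp only [parse_action_items, if_neg hs]
  rfl

theorem portB_some (s : String) (hs : ¬ s = "") :
    parse_action_items_alt (some s)
      = readB (bLoop PySem.Dict.empty (splitAtHeader ((PySem.Str.split? s "\n").getD [])).2) := by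
  simp only [parse_action_items_alt, if_neg hs]
  rfl

-- ===== VERDICT (by name: the statement is the Claim_ definition above) =====
theorem parse_action_items_spec : Claim_equal_parse_action_items := by
  intro ai_content _
  unfold Spec_parse_action_items
  cases ai_content with
  | none => rfl
  | some s =>
    by_cases hs : s = ""
    · simp [parse_action_items, parse_action_items_alt, hs]
    · rw [portA_some s hs, portB_some s hs]
      exact prephase_lemma ((PySem.Str.split? s "\n").getD []) _ _ init_rel
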